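-- pv_equiv track=rewrite | github.com/sadia-saman/Computer-security-sessional | Offline1/1705102/_1705102_f2.py | make_linear_block
-- ===== SOURCE A (Python) =====
-- def make_linear_block(input):
--     j = 0
--     padding = 32
--     block = []
--     while(j<16):
--         if j< len(input) :
--             block.append(ord(input[j]))
--         else:
--             block.append(padding)
--         j = j+1
--     return block
-- ===== SOURCE B (Python) =====
-- def make_linear_block(input):
--     # Truncate to 16 chars, pad on the right with spaces (code 32) via str.ljust,
--     # and let bytes/encode produce the list of character codes -- no explicit loop.
--     return list(input[:16].ljust(16).encode())
-- ===== Notes on version B (the rewrite author's own statement) =====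
-- stated objective: idiomatic
-- what changed: Replaces A's 16-iteration index loop with a per-position bound check by a loop-free library pipeline: slice to 16 chars, str.ljust(16) pads with spaces (code 32), and encode()/list yields the character codes.
import Mathlib
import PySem

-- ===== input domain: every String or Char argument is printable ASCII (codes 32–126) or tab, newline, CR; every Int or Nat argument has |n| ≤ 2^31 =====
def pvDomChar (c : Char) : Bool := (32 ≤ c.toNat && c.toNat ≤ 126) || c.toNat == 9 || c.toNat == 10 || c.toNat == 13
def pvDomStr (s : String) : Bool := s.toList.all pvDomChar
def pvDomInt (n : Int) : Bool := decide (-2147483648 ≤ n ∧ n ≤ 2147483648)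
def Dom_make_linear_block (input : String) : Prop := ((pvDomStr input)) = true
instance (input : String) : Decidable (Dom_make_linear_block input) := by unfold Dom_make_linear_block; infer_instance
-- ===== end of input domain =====

-- B replaces A's 16-step index loop with a loop-free library pipeline:
-- slice to 16 chars, pad with spaces via ljust, take the character codes; idiomatic, same values.

-- ===== PORT A =====
-- while j < 16: append ord(input[j]) if j < len(input) else 32
def make_linear_block (input : String) : List Int :=
  (List.range 16).foldl
    (fun (block : List Int) (j : Nat) =>
      if (j : Int) < (input.toList.length : Int) then
        block ++ [(((PySem.List.pyGet? input.toList (j : Int)).getD ' ').toNat : Int)]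
      else
        block ++ [(32 : Int)])
    []

-- ===== PORT B =====
-- list(input[:16].ljust(16).encode()): pad the truncated char list with spaces, then take codes
-- (encode() of an ASCII string is exactly the list of character codes on the stated domain)
def make_linear_block_alt (input : String) : List Int :=
  let t := input.toList.take 16
  let padded := t ++ List.replicate (16 - t.length) ' '
  padded.map (fun c => (c.toNat : Int))

-- ===== PRECONDITION & SPEC =====
def Spec_make_linear_block (input : String) (out : List Int) : Prop := out = make_linear_block_alt input
instance (input : String) (out : List Int) : Decidable (Spec_make_linear_block input out) := by unfold Spec_make_linear_block; infer_instance

-- ===== CLAIM (what is proved, stated in full; the proofs are below) =====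
def Claim_equal_make_linear_block : Prop := ∀ (input : String), Dom_make_linear_block input → Spec_make_linear_block input (make_linear_block input)

-- ===== LEMMAS AND PROOFS =====

theorem mlb_loop_eq (l : List Char) (n : Nat) :
    (List.range n).foldl
      (fun (block : List Int) (j : Nat) =>
        if (j : Int) < (l.length : Int) then
          block ++ [(((PySem.List.pyGet? l (j : Int)).getD ' ').toNat : Int)]
        else
          block ++ [(32 : Int)])
      []
    = ((l.take n) ++ List.replicate (n - (l.take n).length) ' ').map (fun c => (c.toNat : Int)) := by
  induction n with
  | zero => simp
  | succ n ih =>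
    rw [List.range_succ, List.foldl_append, ih]
    by_cases h : n < l.length
    · have hget : PySem.List.pyGet? l ((n : Nat) : Int) = some l[n] :=
        PySem.List.pyGet?_ofNat l n h
      have hlen : (l.take n).length = n := by simp [Nat.le_of_lt h]
      have hlen1 : (l.take (n + 1)).length = n + 1 := by simp [h]
      simp only [List.foldl_cons, List.foldl_nil]
      rw [if_pos (by exact_mod_cast h), hget]
      have htake : l.take (n + 1) = l.take n ++ [l[n]] := by
        rw [List.take_add_one]
        simp [h]
      rw [htake, hlen]
      simp [List.map_append, hlen1]
      rw [List.take_add_one]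
      simp [h]
    · have hlen : l.length ≤ n := Nat.le_of_not_lt h
      simp only [List.foldl_cons, List.foldl_nil]
      rw [if_neg (by exact_mod_cast h)]
      rw [List.take_of_length_le (Nat.le_succ_of_le hlen), List.take_of_length_le hlen] at *
      have h1 : n + 1 - l.length = (n - l.length) + 1 := by omega
      rw [h1, List.replicate_succ', ← List.append_assoc]
      simp [List.map_append]

-- ===== VERDICT (by name: the statement is the Claim_ definition above) =====
theorem make_linear_block_spec : Claim_equal_make_linear_block := by
  intro input _
  unfold Spec_make_linear_block make_linear_block make_linear_block_alt
  rw [mlb_loop_eq]
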